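-- pv_equiv track=rewrite | github.com/zhiqu22/XQ-MEval | merge.py | find_all_non_overlapping_combinations
-- ===== SOURCE A (Python) =====
-- import itertools
--
-- def non_overlapping(span1, span2):
--     start1, end1 = span1
--     start2, end2 = span2
--     return (end1 <= start2 or end2 <= start1)
--
-- def find_all_non_overlapping_combinations(spans, n):
--     all_combinations = itertools.combinations(spans, n)
--     non_overlapping_combinations = []
--
--     for combination in all_combinations:
--         overlapping = False
--         for i in range(len(combination)):
--             for j in range(i + 1, len(combination)):
--                 if not non_overlapping(combination[i], combination[j]):
--                     overlapping = True
--                     break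
--             if overlapping:
--                 break
--         if not overlapping:
--             non_overlapping_combinations.append(combination)
--
--     return non_overlapping_combinations
-- ===== SOURCE B (Python) =====
-- def find_all_non_overlapping_combinations(spans, n):
--     # Level-by-level construction: level k holds every pairwise non-overlapping
--     # k-subset (chosen so far, remaining suffix), in index-lexicographic order.
--     # A candidate is checked against the chosen spans only, and extensions that
--     # cannot reach length n any more are pruned.
--     level = [((), tuple(spans))]
--     for size in range(n):
--         nxt = []
--         for chosen, rest in level:
--             # rest[k] is usable only if enough elements remain after it
--             for k in range(len(rest) - (n - size) + 1):
--                 s = rest[k]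
--                 if all(c[1] <= s[0] or s[1] <= c[0] for c in chosen):
--                     nxt.append((chosen + (s,), rest[k + 1:]))
--         level = nxt
--     return [chosen for chosen, _ in level]
-- ===== Notes on version B (the rewrite author's own statement) =====
-- stated objective: alternative
-- what changed: Replaces 'enumerate all C(m,n) combinations then check every pair' by a level-by-level construction that extends only pairwise non-overlapping prefixes, checking each candidate against the chosen spans only and pruning extensions that cannot reach length n.
import Mathlib
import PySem

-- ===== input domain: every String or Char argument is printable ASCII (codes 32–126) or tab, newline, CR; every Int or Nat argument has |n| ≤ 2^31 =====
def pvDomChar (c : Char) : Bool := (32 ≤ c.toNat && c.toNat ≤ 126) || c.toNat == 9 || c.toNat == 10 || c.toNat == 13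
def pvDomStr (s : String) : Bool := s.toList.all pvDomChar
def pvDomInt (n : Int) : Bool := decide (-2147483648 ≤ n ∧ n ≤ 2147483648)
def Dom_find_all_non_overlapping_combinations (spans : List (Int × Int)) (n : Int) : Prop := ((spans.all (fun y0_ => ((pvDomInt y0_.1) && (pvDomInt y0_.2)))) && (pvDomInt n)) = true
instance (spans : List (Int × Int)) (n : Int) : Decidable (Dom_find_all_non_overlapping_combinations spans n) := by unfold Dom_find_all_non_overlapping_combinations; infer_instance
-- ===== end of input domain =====

-- B (alternative algorithm): instead of enumerating all C(m,n) combinations and testing every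
-- pair, it grows pairwise non-overlapping subsets level by level (checking each candidate
-- against the chosen spans only) and prunes extensions that cannot reach length n.

-- ===== PORT A =====
-- Python helper non_overlapping(span1, span2)
def non_overlapping (span1 span2 : Int × Int) : Bool :=
  decide (span1.2 ≤ span2.1) || decide (span2.2 ≤ span1.1)

-- A's nested i/j loops with break compute: does some pair (i < j) overlap
def pvHasOverlap : List (Int × Int) → Bool
  | [] => false
  | x :: xs => xs.any (fun y => !non_overlapping x y) || pvHasOverlap xs

-- itertools.combinations(spans, n) → PySem.List.combinations; the for-loop with
-- conditional append → foldl. n < 0 (where Python raises ValueError) is outside Pre_.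
def find_all_non_overlapping_combinations (spans : List (Int × Int)) (n : Int) : List (List (Int × Int)) :=
  (PySem.List.combinations spans n.toNat).foldl
    (fun acc combination => if !pvHasOverlap combination then acc ++ [combination] else acc) []

-- ===== PORT B =====
-- Source B's inner loop over the usable indices k of `rest`: rest[k] may be taken only if
-- enough elements remain after it (len(rest)-k-1 ≥ n-size-1) and it does not overlap
-- a chosen span; the taken pair is (chosen + (s,), rest[k+1:]).
def pvExts (n size : Int) (chosen : List (Int × Int)) : List (Int × Int) → List (List (Int × Int) × List (Int × Int))
  | [] => []
  | s :: suf =>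
    (if (n - size) - 1 ≤ (suf.length : Int) ∧
        chosen.all (fun c => decide (c.2 ≤ s.1) || decide (s.2 ≤ c.1)) = true
     then [(chosen ++ [s], suf)] else []) ++ pvExts n size chosen suf

-- Source B's 'for size in range(n)' loop: fuel counts the remaining levels, size the current one
def pvBfs (n : Int) : Nat → Int → List (List (Int × Int) × List (Int × Int)) → List (List (Int × Int) × List (Int × Int))
  | 0, _, level => level
  | k + 1, size, level => pvBfs n k (size + 1) (level.flatMap (fun cr => pvExts n size cr.1 cr.2))

def find_all_non_overlapping_combinations_alt (spans : List (Int × Int)) (n : Int) : List (List (Int × Int)) :=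
  (pvBfs n n.toNat 0 [([], spans)]).map (fun cr => cr.1)

-- ===== PRECONDITION & SPEC =====
-- Pre_ excludes exactly n < 0, where A's itertools.combinations raises ValueError.
def Pre_find_all_non_overlapping_combinations (spans : List (Int × Int)) (n : Int) : Prop := 0 ≤ n
instance (spans : List (Int × Int)) (n : Int) : Decidable (Pre_find_all_non_overlapping_combinations spans n) := by unfold Pre_find_all_non_overlapping_combinations; infer_instance
def pvWitness_find_all_non_overlapping_combinations : (List (Int × Int)) × Int := ([(0, 2), (1, 3), (2, 4)], 2)

def Spec_find_all_non_overlapping_combinations (spans : List (Int × Int)) (n : Int) (out : List (List (Int × Int))) : Prop := out = find_all_non_overlapping_combinations_alt spans n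
instance (spans : List (Int × Int)) (n : Int) (out : List (List (Int × Int))) : Decidable (Spec_find_all_non_overlapping_combinations spans n out) := by unfold Spec_find_all_non_overlapping_combinations; infer_instance

-- ===== CLAIM (what is proved, stated in full; the proofs are below) =====
def Claim_equal_find_all_non_overlapping_combinations : Prop := ∀ (spans : List (Int × Int)) (n : Int), Dom_find_all_non_overlapping_combinations spans n → Pre_find_all_non_overlapping_combinations spans n → Spec_find_all_non_overlapping_combinations spans n (find_all_non_overlapping_combinations spans n)

-- ===== LEMMAS AND PROOFS =====

-- appending one span: the new pairs are (x, s) for x in a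
theorem pvHasOverlap_append_singleton (a : List (Int × Int)) (s : Int × Int) :
    pvHasOverlap (a ++ [s]) = (pvHasOverlap a || a.any (fun x => !non_overlapping x s)) := by
  induction a with
  | nil => simp [pvHasOverlap]
  | cons x xs ih =>
      simp [pvHasOverlap, ih, List.any_append, Bool.or_assoc, Bool.or_comm, Bool.or_left_comm]

-- a concrete overlapping pair across an append makes pvHasOverlap true
theorem pvHasOverlap_of_mem (a b : List (Int × Int)) (x y : Int × Int)
    (hx : x ∈ a) (hy : y ∈ b) (h : non_overlapping x y = false) :
    pvHasOverlap (a ++ b) = true := by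
  induction a with
  | nil => cases hx
  | cons z zs ih =>
      rcases List.mem_cons.mp hx with rfl | hx'
      · simp only [List.cons_append, pvHasOverlap, Bool.or_eq_true]
        left
        exact List.any_eq_true.mpr ⟨y, List.mem_append.mpr (Or.inr hy), by simp [h]⟩
      · simp only [List.cons_append, pvHasOverlap, Bool.or_eq_true]
        right
        exact ih hx'

-- every prefix produced by one extension step is again pairwise non-overlapping
theorem pvExts_mem_hov (n size : Int) (chosen : List (Int × Int))
    (hov : pvHasOverlap chosen = false) :
    ∀ (rest : List (Int × Int)), ∀ cr ∈ pvExts n size chosen rest, pvHasOverlap cr.1 = false := by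
  intro rest
  induction rest with
  | nil => intro cr h; simp [pvExts] at h
  | cons s suf ih =>
      intro cr h
      rw [pvExts] at h
      rcases List.mem_append.mp h with h1 | h2
      · split at h1
        case isTrue hc =>
          rcases List.mem_singleton.mp h1 with rfl
          rw [pvHasOverlap_append_singleton, hov, Bool.false_or, List.any_eq_false]
          intro x hx
          have := List.all_eq_true.mp hc.2 x hx
          simp [non_overlapping, this]
        case isFalse => simp at h1
      · exact ih cr h2

-- one extension step produces exactly the filtered (k+1)-combinations of `rest`
theorem pvExts_flat (n size : Int) (k : Nat) (hk : n - size = (k : Int) + 1) :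
    ∀ (rest chosen : List (Int × Int)), pvHasOverlap chosen = false →
    (pvExts n size chosen rest).flatMap
        (fun cr => ((PySem.List.combinations cr.2 k).filter
            (fun c => !pvHasOverlap (cr.1 ++ c))).map (fun c => cr.1 ++ c))
      = ((PySem.List.combinations rest (k + 1)).filter
            (fun c => !pvHasOverlap (chosen ++ c))).map (fun c => chosen ++ c) := by
  intro rest
  induction rest with
  | nil =>
      intro chosen _
      simp [pvExts, PySem.List.combinations_nil_succ]
  | cons s suf ih =>
      intro chosen hov
      rw [pvExts, List.flatMap_append, ih chosen hov,
          PySem.List.combinations_cons_succ, List.filter_append, List.map_append]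
      congr 1
      rw [List.filter_map, List.map_map]
      by_cases hc : chosen.all (fun c => decide (c.2 ≤ s.1) || decide (s.2 ≤ c.1)) = true
      · by_cases hlen : (n - size) - 1 ≤ (suf.length : Int)
        · -- usable candidate: one new prefix, producing the filtered k-combinations of suf
          rw [if_pos ⟨hlen, hc⟩]
          simp only [List.flatMap_cons, List.flatMap_nil, List.append_nil]
          congr 1
          · funext c
            simp
          · apply List.filter_congr
            intro c _
            simp [Function.comp]
        · -- not enough elements after s: combinations suf k is empty on both sides
          have hlt : suf.length < k := by omega
          rw [if_neg (by tauto), PySem.List.combinations_eq_nil_of_length_lt suf hlt]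
          simp
      · -- s overlaps some chosen span: every extension by s is filtered out by A
        rw [if_neg (by tauto)]
        symm
        rw [List.flatMap_nil, List.map_eq_nil_iff, List.filter_eq_nil_iff]
        intro c _
        obtain ⟨x, hx, hxs⟩ : ∃ x ∈ chosen, ¬((decide (x.2 ≤ s.1) || decide (s.2 ≤ x.1)) = true) := by
          simpa using hc
        have hno : non_overlapping x s = false := by
          simp only [non_overlapping]
          simpa using hxs
        have hov2 := pvHasOverlap_of_mem chosen (s :: c) x s hx (List.mem_cons_self) hno
        simp [Function.comp, hov2]

-- loop invariant of the level construction: running k more levels from a level of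
-- pairwise non-overlapping prefixes yields, for each prefix, the filtered k-combinations
-- of its remaining suffix, each prefixed by it.
theorem pvBfs_eq (n : Int) : ∀ (k : Nat) (size : Int)
    (level : List (List (Int × Int) × List (Int × Int))),
    n - size = (k : Int) →
    (∀ cr ∈ level, pvHasOverlap cr.1 = false) →
    (pvBfs n k size level).map (fun cr => cr.1)
      = level.flatMap (fun cr => ((PySem.List.combinations cr.2 k).filter
          (fun c => !pvHasOverlap (cr.1 ++ c))).map (fun c => cr.1 ++ c)) := by
  intro k
  induction k with
  | zero =>
      intro size level _ hovs
      rw [pvBfs]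
      induction level with
      | nil => simp
      | cons cr crs ihl =>
          rw [List.map_cons, List.flatMap_cons,
              ihl (fun x hx => hovs x (List.mem_cons_of_mem cr hx))]
          have hov := hovs cr (List.mem_cons_self)
          simp [PySem.List.combinations_zero, hov]
  | succ k ih =>
      intro size level hsz hovs
      rw [pvBfs, ih (size + 1) _ (by omega)
            (fun cr h => by
              obtain ⟨cr0, h0, h1⟩ := List.mem_flatMap.mp h
              exact pvExts_mem_hov n size cr0.1 (hovs cr0 h0) cr0.2 cr h1),
          List.flatMap_assoc]
      apply List.flatMap_congr
      intro cr hcr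
      exact pvExts_flat n size k (by omega) cr.2 cr.1 (hovs cr hcr)

-- A's foldl loop is a filter
theorem portA_eq_filter (spans : List (Int × Int)) (n : Int) :
    find_all_non_overlapping_combinations spans n =
      (PySem.List.combinations spans n.toNat).filter (fun c => !pvHasOverlap c) := by
  unfold find_all_non_overlapping_combinations
  rw [PySem.List.foldl_append_if_eq_filter]
  simp

-- ===== VERDICT (by name: the statement is the Claim_ definition above) =====
theorem find_all_non_overlapping_combinations_spec : Claim_equal_find_all_non_overlapping_combinations := by
  intro spans n _ hpre
  unfold Spec_find_all_non_overlapping_combinations find_all_non_overlapping_combinations_alt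
  have hpre' : (0 : Int) ≤ n := hpre
  rw [portA_eq_filter,
      pvBfs_eq n n.toNat 0 [([], spans)] (by omega) (by intro cr h; simp at h; simp [h, pvHasOverlap])]
  simp
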